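-- pv_equiv track=rewrite | github.com/Praful/advent_of_code | 2015/src/day17.py | part2
-- ===== SOURCE A (Python) =====
-- import math
-- from itertools import combinations
--
-- def find_minimum(containers, target):
--     return min(
--         (len(c) for i in range(1, len(containers) + 1)
--          for c in combinations(containers, i)
--          if sum(c) == target),
--         default=math.inf
--     )
--
-- def part2(containers, target):
--     minimum_containers = find_minimum(containers, target)
--
--     return sum(
--         1
--         for i in range(1, len(containers) + 1)
--         for c in combinations(containers, i)
--         if len(c) == minimum_containers and sum(c) == target
--     )
-- ===== SOURCE B (Python) =====
-- def part2(containers, target):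
--     # One incremental pass: build (size, sum) summaries of all subsets,
--     # then a single scan keeping the minimal size and its multiplicity.
--     pairs = [(0, 0)]
--     for x in containers:
--         pairs += [(k + 1, s + x) for (k, s) in pairs]
--     best = None
--     count = 0
--     for (k, s) in pairs:
--         if k > 0 and s == target:
--             if best is None or k < best:
--                 best, count = k, 1
--             elif k == best:
--                 count += 1
--     return count
-- ===== Notes on version B (the rewrite author's own statement) =====
-- stated objective: alternative
-- what changed: Instead of enumerating combinations of every size twice (once for the minimum, once for the count), B incrementally builds (size, sum) summaries of all subsets in one pass, reusing each partial sum, and finds the minimal size and its multiplicity in a single scan.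
import Mathlib
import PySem

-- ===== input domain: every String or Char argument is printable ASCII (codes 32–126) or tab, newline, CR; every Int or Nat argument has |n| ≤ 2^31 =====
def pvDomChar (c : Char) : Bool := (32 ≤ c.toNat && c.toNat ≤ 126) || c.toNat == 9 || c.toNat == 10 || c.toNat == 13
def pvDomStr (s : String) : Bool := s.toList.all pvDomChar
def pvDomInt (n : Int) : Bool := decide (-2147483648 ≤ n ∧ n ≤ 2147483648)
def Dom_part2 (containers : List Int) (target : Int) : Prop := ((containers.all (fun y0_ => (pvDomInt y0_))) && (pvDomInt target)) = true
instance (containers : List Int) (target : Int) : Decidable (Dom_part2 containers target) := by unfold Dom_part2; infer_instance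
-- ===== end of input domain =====

-- B replaces A's two full passes over combinations of every size by one incremental
-- construction of (size, sum) subset summaries and a single min+count scan (objective: alternative;
-- it trades A's repeated sum recomputation for O(2^n) memory).

-- ===== PORT A =====
-- port of find_minimum: min(... , default=math.inf) becomes Option Int (none = inf)
def findMinimum (containers : List Int) (target : Int) : Option Int :=
  PySem.List.min?
    ((List.range' 1 containers.length).flatMap (fun i =>
      ((PySem.List.combinations containers i).filter (fun c => decide (c.sum = target))).map
        (fun c => ((c.length : Int)))))
    (fun x => x)

def part2 (containers : List Int) (target : Int) : Int :=
  let minimumContainers := findMinimum containers target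
  (List.range' 1 containers.length).foldl
    (fun acc i =>
      (PySem.List.combinations containers i).foldl
        (fun acc2 c =>
          if some ((c.length : Int)) = minimumContainers ∧ c.sum = target then acc2 + 1 else acc2)
        acc)
    0

-- ===== PORT B =====
def part2_alt (containers : List Int) (target : Int) : Int :=
  let pairs := containers.foldl
    (fun acc x => acc ++ acc.map (fun p => (p.1 + 1, p.2 + x)))
    [((0 : Int), (0 : Int))]
  (pairs.foldl
    (fun (st : Option Int × Int) (p : Int × Int) =>
      if 0 < p.1 ∧ p.2 = target then
        match st.1 with
        | none => (some p.1, 1)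
        | some b =>
          if p.1 < b then (some p.1, 1)
          else if p.1 = b then (some b, st.2 + 1)
          else st
      else st)
    (none, 0)).2

-- ===== PRECONDITION & SPEC =====
def Spec_part2 (containers : List Int) (target : Int) (out : Int) : Prop := out = part2_alt containers target
instance (containers : List Int) (target : Int) (out : Int) : Decidable (Spec_part2 containers target out) := by unfold Spec_part2; infer_instance

-- ===== CLAIM (what is proved, stated in full; the proofs are below) =====
def Claim_equal_part2 : Prop := ∀ (containers : List Int) (target : Int), Dom_part2 containers target → Spec_part2 containers target (part2 containers target)

-- ===== LEMMAS AND PROOFS =====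

-- B's pair-filter: keep the size of a nonempty subset summary whose sum is target
def pvF (target : Int) (p : Int × Int) : Option Int :=
  if 0 < p.1 ∧ p.2 = target then some p.1 else none

-- A's subset-filter: keep the (cast) length of a subset whose sum is target
def pvH (target : Int) (c : List Int) : Option Int :=
  if c.sum = target then some ((c.length : Int)) else none

-- B's scan step, factored onto the filtered list of sizes
def pvStep (st : Option Int × Int) (k : Int) : Option Int × Int :=
  match st.1 with
  | none => (some k, 1)
  | some b => if k < b then (some k, 1) else if k = b then (some b, st.2 + 1) else st

lemma map_filter_eq_filterMap {α β : Type} (p : α → Prop) [DecidablePred p] (f : α → β)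
    (l : List α) :
    (l.filter (fun c => decide (p c))).map f
      = l.filterMap (fun c => if p c then some (f c) else none) := by
  induction l with
  | nil => rfl
  | cons a l ih =>
    by_cases h : p a <;> simp [h, ih]

lemma combos_perm {α : Type} : ∀ (xs : List α) (k : Nat),
    (PySem.List.combinations xs k).Perm (List.sublistsLen k xs) := by
  intro xs
  induction xs with
  | nil =>
    intro k
    cases k with
    | zero => simp [PySem.List.combinations_zero, List.sublistsLen_zero]
    | succ k => simp [PySem.List.combinations_nil_succ, List.sublistsLen_succ_nil]
  | cons x xs ih =>
    intro k
    cases k with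
    | zero => simp [PySem.List.combinations_zero, List.sublistsLen_zero]
    | succ k =>
      rw [PySem.List.combinations_cons_succ, List.sublistsLen_succ_cons]
      exact (List.Perm.append ((ih k).map _) (ih (k + 1))).trans List.perm_append_comm

lemma pairs_perm : ∀ (xs : List Int) (acc : List (Int × Int)),
    (xs.foldl (fun acc x => acc ++ acc.map (fun p => (p.1 + 1, p.2 + x))) acc).Perm
      (acc.flatMap (fun p => (List.sublists' xs).map
        (fun c => (p.1 + (c.length : Int), p.2 + c.sum)))) := by
  intro xs
  induction xs with
  | nil => intro acc; simp [List.sublists'_nil]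
  | cons x xs ih =>
    intro acc
    refine (ih _).trans ?_
    rw [List.flatMap_append, List.flatMap_map]
    refine (List.Perm.trans ?_ (List.flatMap_append_perm acc
      (fun p => (List.sublists' xs).map (fun c => (p.1 + (c.length : Int), p.2 + c.sum)))
      (fun p => (List.sublists' xs).map
        (fun c => (p.1 + ((c.length : Int) + 1), p.2 + (x + c.sum)))))).trans ?_
    · refine List.Perm.append (List.Perm.refl _) (List.Perm.of_eq (List.flatMap_congr ?_))
      intro p _
      refine List.map_congr_left ?_
      intro c _
      show (p.1 + 1 + (c.length : Int), p.2 + x + c.sum) = _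
      refine congrArg₂ Prod.mk (by ring) (by ring)
    · refine List.Perm.of_eq (List.flatMap_congr ?_)
      intro p _
      rw [List.sublists'_cons, List.map_append, List.map_map]
      refine congrArg₂ (· ++ ·) rfl (List.map_congr_left ?_)
      intro c _
      show (p.1 + ((c.length : Int) + 1), p.2 + (x + c.sum)) = _
      refine congrArg₂ Prod.mk (by push_cast [List.length_cons]; ring) (by simp [List.sum_cons])

-- the filtered sizes on A's side: exactly A's generator list in find_minimum
lemma lens_eq (containers : List Int) (target : Int) :
    ((List.range' 1 containers.length).flatMap (fun i =>
      ((PySem.List.combinations containers i).filter (fun c => decide (c.sum = target))).map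
        (fun c => ((c.length : Int)))))
    = List.filterMap (pvH target)
        ((List.range' 1 containers.length).flatMap (fun i => PySem.List.combinations containers i)) := by
  rw [List.filterMap_flatMap]
  exact List.flatMap_congr (fun i _ => map_filter_eq_filterMap _ _ _)

lemma flatMap_perm_of_perm {α β : Type} (l : List α) (f g : α → List β)
    (h : ∀ a ∈ l, (f a).Perm (g a)) : (l.flatMap f).Perm (l.flatMap g) := by
  induction l with
  | nil => simp
  | cons a l ih =>
    simp only [List.flatMap_cons]
    exact (h a (by simp)).append (ih (fun b hb => h b (by simp [hb])))

lemma lens_perm (containers : List Int) (target : Int) :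
    (List.filterMap (pvH target)
        ((List.range' 1 containers.length).flatMap (fun i => PySem.List.combinations containers i))).Perm
      (List.filterMap (fun p => pvF target p)
        ((List.sublists' containers).map (fun c => ((c.length : Int), c.sum)))) := by
  -- step A: combinations ~ sublistsLen, componentwise
  refine (List.Perm.filterMap _ (flatMap_perm_of_perm _ _ (fun i => List.sublistsLen i containers)
    (fun i _ => combos_perm containers i))).trans ?_
  -- step B: on nonempty sublists, pvH agrees with pvF after the (length, sum) summary
  rw [List.filterMap_congr
    (g := (fun p => pvF target p) ∘ (fun c => ((c.length : Int), c.sum))) ?_]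
  · -- step C+D: prepend the empty sublist (filtered out by pvF) and use range_bind_sublistsLen_perm
    rw [← List.filterMap_map]
    have h0 : pvF target ((0 : Int), (0 : Int)) = none := by
      simp [pvF]
    have hsplit : (List.range (containers.length + 1)).flatMap
        (fun i => List.sublistsLen i containers)
        = [([] : List Int)] ++ (List.range' 1 containers.length).flatMap
            (fun i => List.sublistsLen i containers) := by
      rw [List.range_eq_range', List.range'_succ]
      simp [List.flatMap_cons, List.sublistsLen_zero]
    have hperm : (([([] : List Int)] ++ (List.range' 1 containers.length).flatMap
        (fun i => List.sublistsLen i containers)).map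
          (fun c => ((c.length : Int), c.sum))).Perm
        ((List.sublists' containers).map (fun c => ((c.length : Int), c.sum))) := by
      refine List.Perm.map _ ?_
      rw [← hsplit]
      exact List.range_bind_sublistsLen_perm containers
    refine List.Perm.trans ?_ (List.Perm.filterMap _ hperm)
    simp [h0]
  · intro c hc
    rw [List.mem_flatMap] at hc
    obtain ⟨i, hi, hci⟩ := hc
    have hlen : c.length = i := List.length_of_sublistsLen hci
    have hipos : 1 ≤ i := (List.mem_range'_1.mp hi).1
    have hpos : (0 : Int) < (c.length : Int) := by
      rw [hlen]; exact_mod_cast hipos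
    have hne : c ≠ [] := List.ne_nil_of_length_pos (by omega)
    by_cases hs : c.sum = target <;> simp [pvH, pvF, hs, hne]

lemma foldl_if_count {α : Type} (p : α → Prop) [DecidablePred p] (l : List α) (a : Int) :
    l.foldl (fun acc c => if p c then acc + 1 else acc) a
      = a + ((l.countP (fun c => decide (p c)) : Nat) : Int) := by
  induction l generalizing a with
  | nil => simp
  | cons c l ih =>
    by_cases h : p c <;> simp [h, ih]; ring

lemma fold_factor (target : Int) (L : List (Int × Int)) (st : Option Int × Int) :
    L.foldl
      (fun (st : Option Int × Int) (p : Int × Int) =>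
        if 0 < p.1 ∧ p.2 = target then
          match st.1 with
          | none => (some p.1, 1)
          | some b =>
            if p.1 < b then (some p.1, 1)
            else if p.1 = b then (some b, st.2 + 1)
            else st
        else st)
      st
    = (L.filterMap (pvF target)).foldl pvStep st := by
  induction L generalizing st with
  | nil => rfl
  | cons p L ih =>
    by_cases h : 0 < p.1 ∧ p.2 = target
    · simp only [List.foldl_cons, List.filterMap_cons, pvF, if_pos h, List.foldl_cons]
      rw [ih]; rfl
    · simp only [List.foldl_cons, List.filterMap_cons, pvF, if_neg h]
      exact ih st

lemma count_cons_ite (a x : Int) (l : List Int) :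
    (x :: l).count a = l.count a + (if x = a then 1 else 0) := by
  simp [List.count_cons]

lemma step_invariant : ∀ (L : List Int) (b c : Int),
    L.foldl pvStep (some b, c)
      = (some (L.foldl min b),
         (if L.foldl min b = b then c else 0) + ((L.count (L.foldl min b) : Nat) : Int)) := by
  intro L
  induction L with
  | nil => intro b c; simp
  | cons k rest ih =>
    intro b c
    rcases lt_trichotomy k b with h | h | h
    · have hmin : min b k = k := min_eq_right h.le
      have hm : rest.foldl min k ≤ k := (PySem.List.foldl_min_le rest k).1
      rw [List.foldl_cons, List.foldl_cons, hmin,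
        show pvStep (some b, c) k = (some k, 1) by simp [pvStep, h], ih]
      refine congrArg₂ Prod.mk rfl ?_
      rw [count_cons_ite]
      split_ifs <;> push_cast <;> omega
    · rw [List.foldl_cons, List.foldl_cons, h, min_self,
        show pvStep (some b, c) b = (some b, c + 1) by simp [pvStep], ih]
      refine congrArg₂ Prod.mk rfl ?_
      rw [count_cons_ite]
      split_ifs <;> push_cast <;> omega
    · have hmin : min b k = b := min_eq_left h.le
      have hm : rest.foldl min b ≤ b := (PySem.List.foldl_min_le rest b).1
      rw [List.foldl_cons, List.foldl_cons, hmin,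
        show pvStep (some b, c) k = (some b, c) by
          simp only [pvStep]; rw [if_neg (by omega), if_neg (by omega)], ih]
      refine congrArg₂ Prod.mk rfl ?_
      rw [count_cons_ite]
      split_ifs <;> push_cast <;> omega

-- ===== VERDICT (by name: the statement is the Claim_ definition above) =====
theorem part2_spec : Claim_equal_part2 := by
  intro containers target _
  show part2 containers target = part2_alt containers target
  have hpairs : (containers.foldl (fun acc x => acc ++ acc.map (fun p => (p.1 + 1, p.2 + x)))
      [((0 : Int), (0 : Int))]).Perm
      ((List.sublists' containers).map (fun c => ((c.length : Int), c.sum))) := by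
    refine (pairs_perm containers _).trans ?_
    simp only [List.flatMap_cons, List.flatMap_nil, List.append_nil]
    exact List.Perm.of_eq (List.map_congr_left (fun c _ => by simp))
  have hLM : (List.filterMap (pvH target)
      ((List.range' 1 containers.length).flatMap (fun i => PySem.List.combinations containers i))).Perm
      (List.filterMap (pvF target)
        (containers.foldl (fun acc x => acc ++ acc.map (fun p => (p.1 + 1, p.2 + x)))
          [((0 : Int), (0 : Int))])) :=
    (lens_perm containers target).trans (List.Perm.filterMap _ hpairs).symm
  simp only [part2, part2_alt, findMinimum, lens_eq]
  rw [fold_factor, ← List.foldl_flatMap]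
  rcases hmin : PySem.List.min? (List.filterMap (pvH target)
      ((List.range' 1 containers.length).flatMap (fun i => PySem.List.combinations containers i)))
      (fun x => x) with _ | mA
  · -- no combination sums to target: both sides are 0
    have hnil : List.filterMap (pvH target)
        ((List.range' 1 containers.length).flatMap (fun i => PySem.List.combinations containers i))
        = [] := (PySem.List.min?_eq_none_iff _ _).mp hmin
    have hMBnil : List.filterMap (pvF target)
        (containers.foldl (fun acc x => acc ++ acc.map (fun p => (p.1 + 1, p.2 + x)))
          [((0 : Int), (0 : Int))]) = [] := by
      have := hLM; rw [hnil] at this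
      exact this.symm.eq_nil
    rw [hMBnil, foldl_if_count]
    simp
  · -- some combination sums to target: both sides count the minimum-size ones
    rcases hMB : List.filterMap (pvF target)
        (containers.foldl (fun acc x => acc ++ acc.map (fun p => (p.1 + 1, p.2 + x)))
          [((0 : Int), (0 : Int))]) with _ | ⟨k, rest⟩
    · exfalso
      have := hLM; rw [hMB] at this
      rw [this.eq_nil,
        (PySem.List.min?_eq_none_iff ([] : List Int) (fun x => x)).mpr rfl] at hmin
      exact absurd hmin (by simp)
    · rw [hMB] at hLM
      -- B's value via the scan invariant
      rw [List.foldl_cons, show pvStep (none, 0) k = (some k, 1) from rfl, step_invariant]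
      set m := rest.foldl min k with hm
      -- the scanned minimum m is the least element of k :: rest
      have hmle : m ≤ k := (PySem.List.foldl_min_le rest k).1
      have hmleall : ∀ y ∈ k :: rest, m ≤ y := by
        intro y hy
        rcases List.mem_cons.mp hy with rfl | hy
        · exact hmle
        · exact (PySem.List.foldl_min_le rest k).2 y hy
      have hmmem : m ∈ k :: rest := by
        rcases PySem.List.foldl_min_mem rest k with h | h
        · rw [hm, h]; exact List.mem_cons_self
        · exact List.mem_cons_of_mem _ h
      -- A's minimum equals m
      have hmA : mA = m := by
        have h1 : m ≤ mA := hmleall _ (hLM.mem_iff.mp (PySem.List.min?_mem hmin))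
        have h2 : mA ≤ m := PySem.List.min?_isMin hmin m (hLM.mem_iff.mpr hmmem)
        omega
      -- A's count is the number of occurrences of m in the filtered list
      rw [foldl_if_count, hmA]
      have hcnt : List.countP
          (fun c => decide (some ((c.length : Int)) = some m ∧ c.sum = target))
          ((List.range' 1 containers.length).flatMap (fun i => PySem.List.combinations containers i))
          = List.count m (List.filterMap (pvH target)
            ((List.range' 1 containers.length).flatMap
              (fun i => PySem.List.combinations containers i))) := by
        rw [List.count_filterMap]
        refine List.countP_congr ?_
        intro c _
        by_cases hs : c.sum = target
        · simp [pvH, hs]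
        · simp [pvH, hs]
      rw [hcnt, hLM.count_eq, count_cons_ite]
      split_ifs <;> push_cast <;> omega
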